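-- pv_equiv track=rewrite | github.com/MrBrantCode/unitest_baseline | mut_generate/mist_train_cf/cf_19094/solution.py | longest_unique_word
-- ===== SOURCE A (Python) =====
-- def longest_unique_word(words):
--     if len(words) == 0:
--         return ""
--
--     longest_word = ""
--     max_length = 0
--
--     for word in words:
--         if len(word) > max_length:
--             if len(set(word)) == len(word):
--                 longest_word = word
--                 max_length = len(word)
--
--     return longest_word
-- ===== SOURCE B (Python) =====
-- def longest_unique_word(words):
--     # Sort-first strategy: stable-sort by length descending, then return the
--     # first word whose characters are all distinct (stability keeps the
--     # earliest original word on length ties, matching A's first-wins rule).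
--     for word in sorted(words, key=len, reverse=True):
--         if len(set(word)) == len(word):
--             return word
--     return ""
-- ===== Notes on version B (the rewrite author's own statement) =====
-- stated objective: alternative
-- what changed: Replaces A's single running-max accumulator loop with a sort-first algorithm: stable sort by length descending, then return the first word with all-distinct characters (early-return scan), "" if none.
import Mathlib
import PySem

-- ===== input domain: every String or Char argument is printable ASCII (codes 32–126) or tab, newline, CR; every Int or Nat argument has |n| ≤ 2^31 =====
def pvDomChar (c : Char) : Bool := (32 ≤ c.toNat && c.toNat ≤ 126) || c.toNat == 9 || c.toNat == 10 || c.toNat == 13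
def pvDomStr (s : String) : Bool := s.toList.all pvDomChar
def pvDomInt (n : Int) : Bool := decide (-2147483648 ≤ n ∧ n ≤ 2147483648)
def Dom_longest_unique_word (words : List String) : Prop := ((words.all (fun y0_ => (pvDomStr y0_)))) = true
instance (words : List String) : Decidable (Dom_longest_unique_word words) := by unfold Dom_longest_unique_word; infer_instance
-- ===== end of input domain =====

-- B replaces A's running-max accumulator loop by a sort-first algorithm (stable sort by length descending, then first all-distinct-character word); objective: alternative.


-- ===== PORT A =====
def longest_unique_word (words : List String) : String :=
  if PySem.List.len words = 0 then ""
  else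
    (words.foldl
      (fun (st : String × Int) word =>
        if PySem.Str.len word > st.2 then
          if PySem.Set.len (PySem.Set.ofList word.toList) = PySem.Str.len word then
            (word, PySem.Str.len word)
          else st
        else st)
      (("" : String), (0 : Int))).1

-- ===== PORT B =====
-- B's for-loop with early return: scan the sorted list, return the first all-distinct word
def pvScanB (l : List String) : String :=
  match l with
  | [] => ""
  | word :: rest =>
    if PySem.Set.len (PySem.Set.ofList word.toList) = PySem.Str.len word then word
    else pvScanB rest

def longest_unique_word_alt (words : List String) : String :=
  pvScanB (PySem.List.sorted words PySem.Str.len true)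

-- ===== PRECONDITION & SPEC =====
def Spec_longest_unique_word (words : List String) (out : String) : Prop := out = longest_unique_word_alt words
instance (words : List String) (out : String) : Decidable (Spec_longest_unique_word words out) := by unfold Spec_longest_unique_word; infer_instance

-- ===== CLAIM (what is proved, stated in full; the proofs are below) =====
def Claim_equal_longest_unique_word : Prop := ∀ (words : List String), Dom_longest_unique_word words → Spec_longest_unique_word words (longest_unique_word words)

-- ===== LEMMAS AND PROOFS =====

-- the uniqueness test shared by both ports
def pvUniq (w : String) : Bool := decide (PySem.Set.len (PySem.Set.ofList w.toList) = PySem.Str.len w)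

-- the comparator sorted(words, key=len, reverse=True) inserts with
def pvBefore (a b : String) : Bool := decide (PySem.Str.len b < PySem.Str.len a)

-- A's loop body
def pvStepA (st : String × Int) (word : String) : String × Int :=
  if PySem.Str.len word > st.2 then
    if PySem.Set.len (PySem.Set.ofList word.toList) = PySem.Str.len word then
      (word, PySem.Str.len word)
    else st
  else st

lemma len_nonneg (w : String) : 0 ≤ PySem.Str.len w := by
  simp [PySem.Str.len]

lemma len_eq_zero_iff (w : String) : PySem.Str.len w = 0 ↔ w = "" := by
  constructor
  · intro h
    exact String.toList_eq_nil_iff.mp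
      (by simpa [PySem.Str.len, List.length_eq_zero_iff] using h)
  · rintro rfl; decide

lemma pvScanB_eq_find (l : List String) :
    pvScanB l = (l.find? pvUniq).getD "" := by
  induction l with
  | nil => rfl
  | cons w ws ih =>
    by_cases h : PySem.Set.len (PySem.Set.ofList w.toList) = PySem.Str.len w
    · rw [pvScanB, if_pos h,
        List.find?_cons_of_pos (show pvUniq w = true from decide_eq_true h)]
      rfl
    · rw [pvScanB, if_neg h,
        List.find?_cons_of_neg (by simp only [pvUniq, decide_eq_true_eq]; exact h), ih]

lemma insertBy_nil (x : String) : PySem.List.insertBy pvBefore x [] = [x] := rfl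

lemma insertBy_cons (x y : String) (ys : List String) :
    PySem.List.insertBy pvBefore x (y :: ys) =
      if pvBefore x y then x :: y :: ys else y :: PySem.List.insertBy pvBefore x ys := rfl

lemma mem_insertBy {x z : String} {l : List String}
    (h : z ∈ PySem.List.insertBy pvBefore x l) : z = x ∨ z ∈ l := by
  induction l with
  | nil => simpa [insertBy_nil] using h
  | cons y ys ih =>
    rw [insertBy_cons] at h
    by_cases hb : pvBefore x y = true
    · rw [if_pos hb] at h
      rcases List.mem_cons.mp h with h | h
      · exact .inl h
      · exact .inr h
    · rw [if_neg hb] at h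
      rcases List.mem_cons.mp h with h | h
      · exact .inr (by simp [h])
      · rcases ih h with h | h
        · exact .inl h
        · exact .inr (List.mem_cons_of_mem y h)

lemma pairwise_insertBy (x : String) {l : List String}
    (h : l.Pairwise (fun a b => PySem.Str.len b ≤ PySem.Str.len a)) :
    (PySem.List.insertBy pvBefore x l).Pairwise
      (fun a b => PySem.Str.len b ≤ PySem.Str.len a) := by
  induction l with
  | nil => simp [insertBy_nil]
  | cons y ys ih =>
    rw [List.pairwise_cons] at h
    rw [insertBy_cons]
    split
    · rename_i hb
      have hxy : PySem.Str.len y < PySem.Str.len x := by simpa [pvBefore] using hb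
      refine List.pairwise_cons.mpr ⟨?_, List.pairwise_cons.mpr h⟩
      intro z hz
      rcases hz with _ | hz
      · exact le_of_lt hxy
      · exact le_trans (h.1 z (by assumption)) (le_of_lt hxy)
    · rename_i hb
      have hxy : PySem.Str.len x ≤ PySem.Str.len y := by
        simpa [pvBefore, not_lt] using hb
      refine List.pairwise_cons.mpr ⟨?_, ih h.2⟩
      intro z hz
      rcases mem_insertBy hz with rfl | hz
      · exact hxy
      · exact h.1 z hz

-- inserting a non-unique word does not change what the scan finds
lemma find_insertBy_skip (x : String) (l : List String) (hx : pvUniq x = false) :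
    (PySem.List.insertBy pvBefore x l).find? pvUniq = l.find? pvUniq := by
  induction l with
  | nil => rw [insertBy_nil, List.find?_cons_of_neg (by simp [hx])]
  | cons y ys ih =>
    rw [insertBy_cons]
    split
    · rw [List.find?_cons_of_neg (by simp [hx])]
    · by_cases hy : pvUniq y = true
      · rw [List.find?_cons_of_pos hy, List.find?_cons_of_pos hy]
      · rw [List.find?_cons_of_neg (by simp [hy]), List.find?_cons_of_neg (by simp [hy]), ih]

-- inserting a unique word strictly longer than every unique word present: it is found
lemma find_insertBy_new (x : String) (l : List String) (hx : pvUniq x = true)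
    (h : ∀ w ∈ l, pvUniq w = true → PySem.Str.len w < PySem.Str.len x) :
    (PySem.List.insertBy pvBefore x l).find? pvUniq = some x := by
  induction l with
  | nil => rw [insertBy_nil, List.find?_cons_of_pos hx]
  | cons y ys ih =>
    rw [insertBy_cons]
    split
    · rw [List.find?_cons_of_pos hx]
    · rename_i hb
      have hxy : PySem.Str.len x ≤ PySem.Str.len y := by
        simpa [pvBefore, not_lt] using hb
      have hy : pvUniq y = false := by
        by_contra hc
        have := h y (by simp) (by simpa using hc)
        omega
      rw [List.find?_cons_of_neg (by simp [hy])]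
      exact ih (fun w hw => h w (by simp [hw]))

-- inserting a unique word no longer than the found one keeps the found one
lemma find_insertBy_keep (x m : String) (l : List String)
    (hp : l.Pairwise (fun a b => PySem.Str.len b ≤ PySem.Str.len a))
    (hm : l.find? pvUniq = some m) (hle : PySem.Str.len x ≤ PySem.Str.len m) :
    (PySem.List.insertBy pvBefore x l).find? pvUniq = some m := by
  induction l with
  | nil => simp at hm
  | cons y ys ih =>
    rw [List.pairwise_cons] at hp
    rw [insertBy_cons]
    split
    · rename_i hb
      have hxy : PySem.Str.len y < PySem.Str.len x := by simpa [pvBefore] using hb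
      -- impossible: m is in y :: ys, so len m ≤ len y < len x ≤ len m
      exfalso
      have hmem : m ∈ y :: ys := List.mem_of_find?_eq_some hm
      have : PySem.Str.len m ≤ PySem.Str.len y := by
        rcases hmem with _ | hmem
        · exact le_refl _
        · exact hp.1 m (by assumption)
      omega
    · by_cases hy : pvUniq y = true
      · rw [List.find?_cons_of_pos hy] at hm
        rw [List.find?_cons_of_pos hy]
        exact hm
      · rw [List.find?_cons_of_neg (by simpa using hy)] at hm
        rw [List.find?_cons_of_neg (by simpa using hy)]
        exact ih hp.2 hm

-- the empty string is inserted at the very end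
lemma insertBy_empty (l : List String) :
    PySem.List.insertBy pvBefore "" l = l ++ [""] := by
  induction l with
  | nil => rfl
  | cons y ys ih =>
    rw [insertBy_cons, if_neg, ih]
    · rfl
    · have := len_nonneg y
      simp only [pvBefore, decide_eq_true_eq]
      intro hc
      have : PySem.Str.len "" = 0 := by decide
      omega

-- the coupling invariant between B's partially sorted list and A's loop state
def pvInv (acc : List String) (st : String × Int) : Prop :=
  (acc.find? pvUniq).getD "" = st.1
  ∧ (∀ w ∈ acc, pvUniq w = true → PySem.Str.len w ≤ st.2)
  ∧ (st = ("", 0) ∨ (pvUniq st.1 = true ∧ st.2 = PySem.Str.len st.1 ∧ 0 < st.2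
        ∧ acc.find? pvUniq = some st.1))
  ∧ acc.Pairwise (fun a b => PySem.Str.len b ≤ PySem.Str.len a)

lemma pvInv_step (acc : List String) (st : String × Int) (x : String)
    (h : pvInv acc st) :
    pvInv (PySem.List.insertBy pvBefore x acc) (pvStepA st x) := by
  obtain ⟨h1, h2, h3, h4⟩ := h
  by_cases hu : pvUniq x = true
  · have hust : PySem.Set.len (PySem.Set.ofList x.toList) = PySem.Str.len x := by
      simpa [pvUniq] using hu
    by_cases hgt : PySem.Str.len x > st.2
    · -- new champion
      have hstep : pvStepA st x = (x, PySem.Str.len x) := by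
        simp only [pvStepA]
        rw [if_pos hgt, if_pos hust]
      have hfind : (PySem.List.insertBy pvBefore x acc).find? pvUniq = some x :=
        find_insertBy_new x acc hu (fun w hw hwu => lt_of_le_of_lt (h2 w hw hwu) hgt)
      have hst2 : 0 ≤ st.2 := by
        rcases h3 with h3 | h3
        · rw [h3]
        · omega
      refine ⟨by rw [hstep, hfind]; rfl, ?_, ?_, pairwise_insertBy x h4⟩
      · intro w hw hwu
        rcases mem_insertBy hw with rfl | hw
        · rw [hstep]
        · rw [hstep]; exact le_of_lt (lt_of_le_of_lt (h2 w hw hwu) hgt)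
      · right
        rw [hstep]
        exact ⟨hu, rfl, by omega, hfind⟩
    · -- x not longer than the running max: A's state unchanged
      have hstep : pvStepA st x = st := by
        simp only [pvStepA]
        rw [if_neg hgt]
      rw [hstep]
      have hle : PySem.Str.len x ≤ st.2 := by omega
      rcases h3 with h3 | h3
      · -- no unique word of positive length yet: x must be ""
        have hx0 : x = "" := by
          have h0 := len_nonneg x
          rw [h3] at hle
          exact (len_eq_zero_iff x).mp (by omega)
        subst hx0
        rw [insertBy_empty]
        have hone : List.find? pvUniq [("" : String)] = some "" :=
          List.find?_cons_of_pos (by decide)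
        have hfind : ((acc ++ [("" : String)]).find? pvUniq).getD "" = "" := by
          rw [List.find?_append]
          cases hf : acc.find? pvUniq with
          | none => rw [hone]; rfl
          | some m =>
            have hm : m = "" := by rw [hf] at h1; rw [h3] at h1; simpa using h1
            simp [hm]
        refine ⟨by rw [hfind, h3], ?_, .inl h3, ?_⟩
        · intro w hw hwu
          rcases List.mem_append.mp hw with hw | hw
          · exact h2 w hw hwu
          · simp at hw; subst hw; rw [h3]; decide
        · refine List.pairwise_append.mpr ⟨h4, by simp, ?_⟩
          intro a ha b hb
          simp at hb; subst hb
          have : PySem.Str.len "" = 0 := by decide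
          have := len_nonneg a
          omega
      · -- a champion exists; x is inserted after it
        obtain ⟨hu1, hlen1, hpos, hfind⟩ := h3
        have hfind' : (PySem.List.insertBy pvBefore x acc).find? pvUniq = some st.1 :=
          find_insertBy_keep x st.1 acc h4 hfind (by omega)
        refine ⟨by rw [hfind']; rfl, ?_, .inr ⟨hu1, hlen1, hpos, hfind'⟩,
          pairwise_insertBy x h4⟩
        intro w hw hwu
        rcases mem_insertBy hw with rfl | hw
        · exact hle
        · exact h2 w hw hwu
  · -- x not unique: both sides ignore it
    have hu' : ¬ PySem.Set.len (PySem.Set.ofList x.toList) = PySem.Str.len x := by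
      simpa [pvUniq] using hu
    have hskip := find_insertBy_skip x acc (by simpa using hu)
    have hstep : pvStepA st x = st := by
      by_cases hgt : PySem.Str.len x > st.2
      · simp only [pvStepA]
        rw [if_pos hgt, if_neg hu']
      · simp only [pvStepA]
        rw [if_neg hgt]
    rw [hstep]
    refine ⟨by rw [hskip]; exact h1, ?_, ?_, pairwise_insertBy x h4⟩
    · intro w hw hwu
      rcases mem_insertBy hw with rfl | hw
      · exact absurd hwu hu
      · exact h2 w hw hwu
    · rcases h3 with h3 | h3
      · exact .inl h3
      · exact .inr ⟨h3.1, h3.2.1, h3.2.2.1, by rw [hskip]; exact h3.2.2.2⟩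

lemma pvInv_foldl (ws : List String) :
    ∀ (acc : List String) (st : String × Int), pvInv acc st →
      pvInv (ws.foldl (fun a x => PySem.List.insertBy pvBefore x a) acc)
        (ws.foldl pvStepA st) := by
  induction ws with
  | nil => intro acc st h; exact h
  | cons x xs ih =>
    intro acc st h
    exact ih _ _ (pvInv_step acc st x h)

lemma sorted_eq_foldl (words : List String) :
    PySem.List.sorted words PySem.Str.len true =
      words.foldl (fun a x => PySem.List.insertBy pvBefore x a) [] := rfl

-- ===== VERDICT (by name: the statement is the Claim_ definition above) =====
theorem longest_unique_word_spec : Claim_equal_longest_unique_word := by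
  intro words _
  unfold Spec_longest_unique_word longest_unique_word longest_unique_word_alt
  rw [pvScanB_eq_find, sorted_eq_foldl]
  have hinv : pvInv (words.foldl (fun a x => PySem.List.insertBy pvBefore x a) [])
      (words.foldl pvStepA ("", 0)) :=
    pvInv_foldl words [] ("", 0) ⟨rfl, by simp, .inl rfl, by simp⟩
  have hfoldA : words.foldl
      (fun (st : String × Int) word =>
        if PySem.Str.len word > st.2 then
          if PySem.Set.len (PySem.Set.ofList word.toList) = PySem.Str.len word then
            (word, PySem.Str.len word)
          else st
        else st) (("" : String), (0 : Int)) = words.foldl pvStepA ("", 0) := rfl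
  by_cases hnil : words = []
  · subst hnil; decide
  · rw [if_neg (by simp [PySem.List.len_eq, List.length_eq_zero_iff, hnil]), hfoldA]
    exact (hinv.1).symm
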